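-- pv_equiv track=rewrite | github.com/jotica0602/AoC | 2024/day_22/solution.py | calculate_secret_number
-- ===== SOURCE A (Python) =====
-- def mix(n,m): return n^m
--
-- def prune(n): return n & ((2 << 23) - 1)
--
-- def calculate_secret_number(n,times):
--     for i in range(times):
--         m = n << 6
--         n = mix(n,m)
--         n = prune(n)
--         m = n >> 5
--         n = mix(n,m)
--         n = prune(n)
--         m = n << 11
--         n = mix(n,m)
--         n = prune(n)
--     return n
-- ===== SOURCE B (Python) =====
-- def _step(n):
--     n = (n ^ (n << 6)) & 0xFFFFFF
--     n = (n ^ (n >> 5)) & 0xFFFFFF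
--     return (n ^ (n << 11)) & 0xFFFFFF
--
-- def _apply(cols, v):
--     out = 0
--     for i in range(24):
--         if (v >> i) & 1:
--             out ^= cols[i]
--     return out
--
-- def _compose(a, b):
--     return [_apply(a, c) for c in b]
--
-- def calculate_secret_number(n, times):
--     if times <= 0:
--         return n
--     # one raw PRNG step brings the state into the 24-bit range
--     n = _step(n)
--     # the step is GF(2)-linear on 24-bit states: remaining steps by
--     # binary exponentiation of the step matrix (columns = images of basis bits)
--     m = [_step(1 << i) for i in range(24)]
--     p = [1 << i for i in range(24)]
--     t = times - 1
--     while t > 0: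
--         if t & 1:
--             p = _compose(m, p)
--         m = _compose(m, m)
--         t >>= 1
--     return _apply(p, n)
-- ===== Notes on version B (the rewrite author's own statement) =====
-- stated objective: faster
-- what changed: B replaces A's step-by-step iteration of the 24-bit XOR/shift PRNG by binary exponentiation of the step's GF(2) matrix (columns = images of the 24 basis bits), after one raw step to bring the state into the 24-bit range.
import Mathlib
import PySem

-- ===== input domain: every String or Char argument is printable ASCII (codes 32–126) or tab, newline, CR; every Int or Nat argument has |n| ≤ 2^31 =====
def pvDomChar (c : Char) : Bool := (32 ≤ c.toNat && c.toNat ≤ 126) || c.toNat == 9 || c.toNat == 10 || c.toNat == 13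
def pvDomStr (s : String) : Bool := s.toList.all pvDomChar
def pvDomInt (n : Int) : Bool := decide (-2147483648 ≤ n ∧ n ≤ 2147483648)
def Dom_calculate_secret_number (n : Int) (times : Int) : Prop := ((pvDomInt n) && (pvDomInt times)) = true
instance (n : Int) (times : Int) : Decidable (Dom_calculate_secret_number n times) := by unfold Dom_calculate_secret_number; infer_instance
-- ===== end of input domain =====

-- B replaces A's step-by-step loop (O(times) PRNG steps) by GF(2) matrix exponentiation
-- of the 24-bit linear step map (binary powering), a genuinely different algorithm.

-- ===== PORT A =====
def mix (n m : Int) : Int := PySem.Int.bxor n m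

def prune (n : Int) : Int := PySem.Int.band n (((2:Int) <<< (23:Nat)) - 1)

def calculate_secret_number (n : Int) (times : Int) : Int :=
  (PySem.List.pyRange 0 times).foldl (fun n _i =>
    let m := n <<< (6:Nat)
    let n := prune (mix n m)
    let m := n >>> (5:Nat)
    let n := prune (mix n m)
    let m := n <<< (11:Nat)
    prune (mix n m)) n

-- ===== PORT B =====
-- one PRNG step (Source B _step); shift counts are the literal nonnegative constants 6, 5, 11
def pvStep (n : Int) : Int :=
  let a := PySem.Int.band (PySem.Int.bxor n (n <<< (6:Nat))) 16777215
  let b := PySem.Int.band (PySem.Int.bxor a (a >>> (5:Nat))) 16777215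
  PySem.Int.band (PySem.Int.bxor b (b <<< (11:Nat))) 16777215

-- Source B _apply: xor together the columns selected by the bits of v
-- (i ranges over range(24), hence i ≥ 0, so `.toNat` on the shift count is exact)
def pvApplyI (cols : List Int) (v : Int) : Int :=
  (PySem.List.pyRange 0 24).foldl
    (fun out i =>
      if PySem.Int.band (v >>> i.toNat) 1 ≠ 0 then PySem.Int.bxor out (PySem.List.pyGetD cols i 0)
      else out) 0

-- Source B _compose
def pvComposeI (a b : List Int) : List Int := b.map (fun c => pvApplyI a c)

-- Source B while-loop: binary exponentiation of the column matrix
def pvPow (m p : List Int) (t : Int) : List Int :=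
  if t ≤ 0 then p
  else pvPow (pvComposeI m m) (if PySem.Int.band t 1 ≠ 0 then pvComposeI m p else p) (t >>> (1:Nat))
termination_by t.toNat
decreasing_by
  rename_i ht
  rw [Int.shiftRight_eq_div_pow]
  omega

def calculate_secret_number_alt (n : Int) (times : Int) : Int :=
  if times ≤ 0 then n
  else
    let n1 := pvStep n
    let m := (PySem.List.pyRange 0 24).map (fun i => pvStep ((1:Int) <<< i.toNat))
    let p := (PySem.List.pyRange 0 24).map (fun i => (1:Int) <<< i.toNat)
    pvApplyI (pvPow m p (times - 1)) n1

-- ===== PRECONDITION & SPEC =====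
def Spec_calculate_secret_number (n : Int) (times : Int) (out : Int) : Prop := out = calculate_secret_number_alt n times
instance (n : Int) (times : Int) (out : Int) : Decidable (Spec_calculate_secret_number n times out) := by unfold Spec_calculate_secret_number; infer_instance

-- ===== CLAIM (what is proved, stated in full; the proofs are below) =====
def Claim_equal_calculate_secret_number : Prop := ∀ (n : Int) (times : Int), Dom_calculate_secret_number n times → Spec_calculate_secret_number n times (calculate_secret_number n times)

-- ===== LEMMAS AND PROOFS =====

-- Nat-level model of one PRNG step
def st1 (v : Nat) : Nat := (v ^^^ (v <<< 6)) &&& 16777215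
def st2 (v : Nat) : Nat := (v ^^^ (v >>> 5)) &&& 16777215
def st3 (v : Nat) : Nat := (v ^^^ (v <<< 11)) &&& 16777215
def SN (v : Nat) : Nat := st3 (st2 (st1 v))

-- Nat-level model of the matrix machinery
def applyN (ws : List Nat) (v : Nat) : Nat :=
  (List.range 24).foldl (fun acc i => if v.testBit i then acc ^^^ ws.getD i 0 else acc) 0
def composeN (a b : List Nat) : List Nat := b.map (applyN a)
def powN (m p : List Nat) (t : Nat) : List Nat :=
  if t = 0 then p else powN (composeN m m) (if t &&& 1 = 1 then composeN m p else p) (t >>> 1)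
termination_by t
decreasing_by
  rename_i ht
  rw [Nat.shiftRight_eq_div_pow]
  omega
def MN : List Nat := (List.range 24).map (fun i => SN (2 ^ i))
def IN : List Nat := (List.range 24).map (fun i => 2 ^ i)
def InvM (ws : List Nat) : Prop := ws.length = 24 ∧ ∀ c ∈ ws, c < 2 ^ 24
def castL (ws : List Nat) : List Int := ws.map (fun (w : Nat) => (w : Int))

-- ---- linearity of the step over GF(2) ----
theorem bool_stage (x y u v m d : Bool) :
    (((x ^^ y) ^^ (d && (u ^^ v))) && m) = (((x ^^ (d && u)) && m) ^^ ((y ^^ (d && v)) && m)) := by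
  cases x <;> cases y <;> cases u <;> cases v <;> cases m <;> cases d <;> rfl

theorem st1_linear (a b : Nat) : st1 (a ^^^ b) = st1 a ^^^ st1 b := by
  apply Nat.eq_of_testBit_eq
  intro i
  simp only [st1, Nat.testBit_and, Nat.testBit_xor, Nat.testBit_shiftLeft]
  exact bool_stage _ _ _ _ _ _

theorem st2_linear (a b : Nat) : st2 (a ^^^ b) = st2 a ^^^ st2 b := by
  apply Nat.eq_of_testBit_eq
  intro i
  simp only [st2, Nat.testBit_and, Nat.testBit_xor, Nat.testBit_shiftRight]
  have := bool_stage (a.testBit i) (b.testBit i) (a.testBit (5 + i)) (b.testBit (5 + i)) ((16777215:Nat).testBit i) true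
  simpa using this

theorem st3_linear (a b : Nat) : st3 (a ^^^ b) = st3 a ^^^ st3 b := by
  apply Nat.eq_of_testBit_eq
  intro i
  simp only [st3, Nat.testBit_and, Nat.testBit_xor, Nat.testBit_shiftLeft]
  exact bool_stage _ _ _ _ _ _

theorem SN_linear (a b : Nat) : SN (a ^^^ b) = SN a ^^^ SN b := by
  simp only [SN, st1_linear, st2_linear, st3_linear]

theorem SN_zero : SN 0 = 0 := by decide

theorem SN_lt (v : Nat) : SN v < 2 ^ 24 := by
  have h : SN v ≤ 16777215 := Nat.and_le_right
  omega

-- ---- generic facts about the xor-select fold ----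
theorem foldl_id (l : List Nat) (x : Nat) : l.foldl (fun acc (_ : Nat) => acc) x = x := by
  induction l with
  | nil => rfl
  | cons h t ih => simpa using ih

theorem xor_shuffle (x y w : Nat) : (x ^^^ w) ^^^ (y ^^^ w) = x ^^^ y := by
  rw [Nat.xor_assoc, Nat.xor_comm y w, ← Nat.xor_assoc w w y, Nat.xor_self, Nat.zero_xor]

theorem foldl_test_linear (w : Nat → Nat) (ta tb : Nat → Bool) :
    ∀ (l : List Nat) (x y : Nat),
      l.foldl (fun acc i => if (ta i ^^ tb i) = true then acc ^^^ w i else acc) (x ^^^ y)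
        = l.foldl (fun acc i => if ta i = true then acc ^^^ w i else acc) x ^^^
          l.foldl (fun acc i => if tb i = true then acc ^^^ w i else acc) y := by
  intro l
  induction l with
  | nil => intro x y; rfl
  | cons h t ih =>
    intro x y
    simp only [List.foldl_cons]
    cases hta : ta h <;> cases htb : tb h <;>
      simp only [hta, htb, Bool.xor_false, Bool.false_xor, Bool.xor_true, Bool.true_xor,
        Bool.not_false, Bool.not_true, reduceIte]
    · exact ih x y
    · rw [Nat.xor_assoc]
      exact ih x (y ^^^ w h)
    · rw [Nat.xor_assoc, Nat.xor_comm y (w h), ← Nat.xor_assoc]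
      exact ih (x ^^^ w h) y
    · rw [← xor_shuffle x y (w h)]
      exact ih (x ^^^ w h) (y ^^^ w h)

theorem applyN_linear (ws : List Nat) (a b : Nat) :
    applyN ws (a ^^^ b) = applyN ws a ^^^ applyN ws b := by
  unfold applyN
  have h := foldl_test_linear (fun i => ws.getD i 0) a.testBit b.testBit (List.range 24) 0 0
  simpa [Nat.testBit_xor] using h

theorem applyN_zero (ws : List Nat) : applyN ws 0 = 0 := by
  unfold applyN
  simp only [Nat.zero_testBit, Bool.false_eq_true, ite_false]
  exact foldl_id _ _

theorem foldl_test_lt (w : Nat → Nat) (t : Nat → Bool) :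
    ∀ (l : List Nat) (x : Nat), x < 2 ^ 24 → (∀ i ∈ l, w i < 2 ^ 24) →
      l.foldl (fun acc i => if t i = true then acc ^^^ w i else acc) x < 2 ^ 24 := by
  intro l
  induction l with
  | nil => intro x hx _; simpa using hx
  | cons h tl ih =>
    intro x hx hw
    simp only [List.foldl_cons]
    by_cases hth : t h = true
    · rw [if_pos hth]
      exact ih _ (Nat.xor_lt_two_pow hx (hw h (by simp))) (fun i hi => hw i (List.mem_cons_of_mem _ hi))
    · rw [if_neg hth]
      exact ih _ hx (fun i hi => hw i (List.mem_cons_of_mem _ hi))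

theorem applyN_lt (ws : List Nat) (v : Nat) (h : ∀ c ∈ ws, c < 2 ^ 24) :
    applyN ws v < 2 ^ 24 := by
  unfold applyN
  apply foldl_test_lt _ _ _ _ (by norm_num)
  intro i _
  by_cases hi : i < ws.length
  · rw [List.getD_eq_getElem _ _ hi]
    exact h _ (List.getElem_mem hi)
  · rw [List.getD_eq_default _ _ (by omega)]
    norm_num

-- every linear map on 24-bit values is determined by its values on the basis bits
theorem lin_decomp (f : Nat → Nat) (h0 : f 0 = 0) (hl : ∀ a b, f (a ^^^ b) = f a ^^^ f b) :
    ∀ (k v : Nat), v < 2 ^ k →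
      f v = (List.range k).foldl (fun acc i => if v.testBit i then acc ^^^ f (2 ^ i) else acc) 0 := by
  intro k
  induction k with
  | zero =>
    intro v hv
    interval_cases v
    simpa using h0
  | succ k ih =>
    intro v hv
    rw [List.range_succ, List.foldl_append]
    by_cases hvk : v < 2 ^ k
    · have hbit : v.testBit k = false := Nat.testBit_lt_two_pow hvk
      simp only [List.foldl_cons, List.foldl_nil, hbit, Bool.false_eq_true, ite_false]
      exact ih v hvk
    · push_neg at hvk
      have hpos : (0:Nat) < 2 ^ k := by positivity
      set lo := v % 2 ^ k with hlo
      have hlolt : lo < 2 ^ k := Nat.mod_lt _ hpos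
      have hbitk : v.testBit k = true := by
        have h1 : v >>> k = 1 := by
          rw [Nat.shiftRight_eq_div_pow]
          apply Nat.div_eq_of_lt_le (by simpa using hvk)
          have : (1 + 1) * 2 ^ k = 2 ^ (k + 1) := by ring
          rw [this]
          exact hv
        have h2 : (v >>> k).testBit 0 = v.testBit k := by
          simp [Nat.testBit_shiftRight]
        rw [← h2, h1]
        rfl
      have hxor : v ^^^ 2 ^ k = lo := by
        apply Nat.eq_of_testBit_eq
        intro i
        rw [hlo, Nat.testBit_mod_two_pow, Nat.testBit_xor, Nat.testBit_two_pow]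
        rcases lt_trichotomy i k with h | h | h
        · simp [h, Nat.ne_of_gt h]
        · subst h
          simp [hbitk]
        · have hvi : v.testBit i = false :=
            Nat.testBit_lt_two_pow (lt_of_lt_of_le hv (Nat.pow_le_pow_right (by norm_num) h))
          simp [hvi, Nat.ne_of_lt h, Nat.lt_asymm h]
      have hv_eq : v = lo ^^^ 2 ^ k := by
        rw [← hxor, Nat.xor_xor_cancel_right]
      have hfv : f v = f lo ^^^ f (2 ^ k) := by
        conv_lhs => rw [hv_eq]
        exact hl lo (2 ^ k)
      have hcong : (List.range k).foldl (fun acc i => if v.testBit i then acc ^^^ f (2 ^ i) else acc) 0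
          = (List.range k).foldl (fun acc i => if lo.testBit i then acc ^^^ f (2 ^ i) else acc) 0 := by
        apply PySem.List.foldl_congr_mem
        intro acc x hx
        have hxk : x < k := List.mem_range.mp hx
        have hbx : lo.testBit x = v.testBit x := by
          rw [hlo, Nat.testBit_mod_two_pow]
          simp [hxk]
        rw [hbx]
      simp only [List.foldl_cons, List.foldl_nil, hbitk, ite_true]
      rw [hcong, ← ih lo hlolt, hfv]

theorem applyN_eq_of_basis (f : Nat → Nat) (h0 : f 0 = 0) (hl : ∀ a b, f (a ^^^ b) = f a ^^^ f b)
    (ws : List Nat) (hws : ∀ i, i < 24 → ws.getD i 0 = f (2 ^ i)) (v : Nat) (hv : v < 2 ^ 24) :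
    applyN ws v = f v := by
  rw [lin_decomp f h0 hl 24 v hv]
  unfold applyN
  apply PySem.List.foldl_congr_mem
  intro acc x hx
  rw [hws x (List.mem_range.mp hx)]

theorem foldl_no_hit (w : Nat → Nat) (i : Nat) :
    ∀ (l : List Nat) (acc : Nat), i ∉ l →
      l.foldl (fun acc j => if i = j then acc ^^^ w j else acc) acc = acc := by
  intro l
  induction l with
  | nil => intro acc _; rfl
  | cons h t ih =>
    intro acc hi
    simp only [List.mem_cons, not_or] at hi
    rw [List.foldl_cons, if_neg hi.1]
    exact ih acc hi.2

theorem foldl_one_hit (w : Nat → Nat) (i : Nat) :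
    ∀ (l : List Nat) (acc : Nat), l.Nodup → i ∈ l →
      l.foldl (fun acc j => if i = j then acc ^^^ w j else acc) acc = acc ^^^ w i := by
  intro l
  induction l with
  | nil => intro acc _ hi; cases hi
  | cons h t ih =>
    intro acc hnd hi
    have hnd' := List.nodup_cons.mp hnd
    by_cases hih : i = h
    · subst hih
      rw [List.foldl_cons, if_pos rfl]
      exact foldl_no_hit w i t _ hnd'.1
    · rw [List.foldl_cons, if_neg hih]
      rcases List.mem_cons.mp hi with h1 | h1
      · exact absurd h1 hih
      · exact ih acc hnd'.2 h1

theorem applyN_basis (ws : List Nat) (i : Nat) (h : i < 24) : applyN ws (2 ^ i) = ws.getD i 0 := by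
  unfold applyN
  simp only [Nat.testBit_two_pow, decide_eq_true_eq]
  rw [foldl_one_hit (fun j => ws.getD j 0) i (List.range 24) 0 (List.nodup_range)
    (List.mem_range.mpr h), Nat.zero_xor]

theorem compose_apply (a b : List Nat) (hb : b.length = 24) (v : Nat) (hv : v < 2 ^ 24) :
    applyN (composeN a b) v = applyN a (applyN b v) := by
  apply applyN_eq_of_basis (fun v => applyN a (applyN b v))
  · simp [applyN_zero]
  · intro x y
    simp [applyN_linear]
  · intro i hi
    have h0 : (0 : Nat) = applyN a 0 := (applyN_zero a).symm
    calc (composeN a b).getD i 0 = (b.map (applyN a)).getD i (applyN a 0) := by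
          rw [← applyN_zero a]; rfl
      _ = applyN a (b.getD i 0) := List.getD_map b 0 (applyN a)
      _ = applyN a (applyN b (2 ^ i)) := by rw [applyN_basis b i hi]
  · exact hv

theorem InvM_compose {a b : List Nat} (ha : InvM a) (hb : InvM b) : InvM (composeN a b) := by
  constructor
  · simp [composeN, hb.1]
  · intro c hc
    simp only [composeN, List.mem_map] at hc
    obtain ⟨x, _, rfl⟩ := hc
    exact applyN_lt a x ha.2

theorem iter_double (m : List Nat) (hm : InvM m) :
    ∀ (k v : Nat), v < 2 ^ 24 → (applyN (composeN m m))^[k] v = (applyN m)^[2 * k] v := by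
  intro k
  induction k with
  | zero => intro v _; rfl
  | succ k ih =>
    intro v hv
    rw [Function.iterate_succ_apply, compose_apply m m hm.1 v hv]
    have h2 : applyN m (applyN m v) < 2 ^ 24 := applyN_lt _ _ hm.2
    rw [ih _ h2]
    have : 2 * (k + 1) = 2 * k + 1 + 1 := by ring
    rw [this, Function.iterate_succ_apply, Function.iterate_succ_apply]

theorem powN_spec : ∀ (t : Nat) (m p : List Nat), InvM m → InvM p → ∀ v, v < 2 ^ 24 →
    applyN (powN m p t) v = (applyN m)^[t] (applyN p v) := by
  intro t
  induction t using Nat.strong_induction_on with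
  | _ t ih =>
    intro m p hm hp v hv
    by_cases ht : t = 0
    · subst ht
      rw [powN]
      simp
    · rw [powN, if_neg ht]
      have hhalf : t >>> 1 < t := by
        rw [Nat.shiftRight_eq_div_pow]
        omega
      have hp' : InvM (if t &&& 1 = 1 then composeN m p else p) := by
        split
        · exact InvM_compose hm hp
        · exact hp
      rw [ih _ hhalf (composeN m m) _ (InvM_compose hm hm) hp' v hv,
        iter_double m hm _ _ (applyN_lt _ _ hp'.2)]
      rw [Nat.shiftRight_eq_div_pow, pow_one]
      by_cases hodd : t &&& 1 = 1
      · rw [if_pos hodd, compose_apply m p hp.1 v hv, ← Function.iterate_succ_apply]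
        congr 1
        rw [Nat.and_one_is_mod] at hodd
        omega
      · rw [if_neg hodd]
        congr 1
        rw [Nat.and_one_is_mod] at hodd
        omega

-- ---- Int ↔ Nat bridges for the ports ----
theorem mask_cast : (16777215 : Int) = ((16777215 : Nat) : Int) := by norm_num

theorem step_cast (w : Nat) : pvStep ((w : Nat) : Int) = ((SN w : Nat) : Int) := by
  simp only [pvStep, SN, st1, st2, st3, mask_cast, ← Int.natCast_shiftLeft,
    ← Int.natCast_shiftRight, PySem.Int.bxor_natCast, PySem.Int.band_natCast]

theorem band_mask (y : Int) : ∃ w : Nat, w < 2 ^ 24 ∧ PySem.Int.band y 16777215 = ((w : Nat) : Int) := by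
  unfold PySem.Int.band
  split_ifs with h1 h2 h3
  · exact ⟨y.toNat &&& (16777215 : Int).toNat, by
      have : y.toNat &&& (16777215 : Int).toNat ≤ (16777215 : Int).toNat := Nat.and_le_right
      have h16 : (16777215 : Int).toNat = 16777215 := rfl
      omega, rfl⟩
  · omega
  · refine ⟨(16777215 : Int).toNat - ((16777215 : Int).toNat &&& (-y - 1).toNat), ?_, rfl⟩
    have h16 : (16777215 : Int).toNat = 16777215 := rfl
    omega
  · omega

theorem step_int_bound (x : Int) : ∃ w : Nat, w < 2 ^ 24 ∧ pvStep x = ((w : Nat) : Int) := by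
  simp only [pvStep]
  exact band_mask _

theorem testbit_of_band (v : Nat) (i : Nat) : ((v >>> i) &&& 1 ≠ 0) ↔ v.testBit i = true := by
  have h2 : (v >>> i).testBit 0 = v.testBit i := by simp [Nat.testBit_shiftRight]
  rw [← h2, Nat.and_one_is_mod, Nat.testBit_zero]
  have := Nat.mod_lt (v >>> i) (show 0 < 2 by norm_num)
  constructor
  · intro h
    simp only [decide_eq_true_eq]
    omega
  · intro h
    simp only [decide_eq_true_eq] at h
    omega

theorem pyRange24 : PySem.List.pyRange 0 24 = (List.range 24).map (fun i => (i : Int)) := by decide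

theorem castL_getD (ws : List Nat) (h : Nat) : (castL ws).getD h 0 = ((ws.getD h 0 : Nat) : Int) := by
  rcases lt_or_ge h ws.length with hlt | hge
  · rw [List.getD_eq_getElem _ _ (by simpa [castL] using hlt),
      List.getD_eq_getElem _ _ hlt]
    simp [castL]
  · rw [List.getD_eq_default _ _ (by simpa [castL] using hge),
      List.getD_eq_default _ _ hge]
    simp

theorem applyI_cast_aux (ws : List Nat) (v : Nat) :
    ∀ (l : List Nat) (acc : Nat),
      List.foldl (fun (out : Int) (i : Nat) =>
          if PySem.Int.band (((v : Nat) : Int) >>> ((i : Int)).toNat) 1 ≠ 0 then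
            PySem.Int.bxor out (PySem.List.pyGetD (castL ws) ((i : Int)) 0)
          else out) ((acc : Nat) : Int) l
        = (((l.foldl (fun acc i => if v.testBit i then acc ^^^ ws.getD i 0 else acc) acc : Nat)) : Int) := by
  intro l
  induction l with
  | nil => intro acc; rfl
  | cons h t iht =>
    intro acc
    simp only [List.foldl_cons]
    have hcond : (PySem.Int.band (((v : Nat) : Int) >>> ((h : Int)).toNat) 1 ≠ 0) ↔ v.testBit h = true := by
      rw [Int.toNat_natCast, ← Int.natCast_shiftRight,
        show (1 : Int) = ((1 : Nat) : Int) from rfl, PySem.Int.band_natCast,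
        show ((0:Int) = ((0:Nat) : Int)) from rfl, Int.natCast_inj.ne]
      exact testbit_of_band v h
    have hval : PySem.List.pyGetD (castL ws) ((h : Nat) : Int) 0 = ((ws.getD h 0 : Nat) : Int) := by
      rw [PySem.List.pyGetD_natCast]
      exact castL_getD ws h
    by_cases hb : v.testBit h = true
    · rw [if_pos (hcond.mpr hb), if_pos hb, hval, PySem.Int.bxor_natCast]
      exact iht _
    · rw [if_neg (fun hc => hb (hcond.mp hc)), if_neg hb]
      exact iht _

theorem applyI_cast (ws : List Nat) (v : Nat) :
    pvApplyI (castL ws) ((v : Nat) : Int) = ((applyN ws v : Nat) : Int) := by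
  unfold pvApplyI applyN
  rw [pyRange24, List.foldl_map]
  exact applyI_cast_aux ws v (List.range 24) 0

theorem composeI_cast (a b : List Nat) : pvComposeI (castL a) (castL b) = castL (composeN a b) := by
  unfold pvComposeI composeN
  simp only [castL, List.map_map]
  apply List.map_congr_left
  intro x _
  exact applyI_cast a x

theorem pow_cast : ∀ (k : Nat) (t : Int), t.toNat = k → ∀ (mw pw : List Nat),
    pvPow (castL mw) (castL pw) t = castL (powN mw pw k) := by
  intro k
  induction k using Nat.strong_induction_on with
  | _ k ih =>
    intro t hk mw pw
    by_cases ht : t ≤ 0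
    · rw [pvPow, if_pos ht]
      have : k = 0 := by omega
      subst this
      rw [powN]
      simp
    · rw [pvPow, if_neg ht]
      have htn : t = ((k : Nat) : Int) := by omega
      have hk0 : k ≠ 0 := by omega
      rw [powN, if_neg hk0]
      have hshift : (t >>> (1:Nat)).toNat = k >>> 1 := by
        rw [htn, ← Int.natCast_shiftRight, Int.toNat_natCast]
      have hhalf : k >>> 1 < k := by
        rw [Nat.shiftRight_eq_div_pow]
        omega
      have hcond : (PySem.Int.band t 1 ≠ 0) ↔ (k &&& 1 = 1) := by
        rw [htn, show (1 : Int) = ((1 : Nat) : Int) from rfl, PySem.Int.band_natCast,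
          show ((0:Int) = ((0:Nat) : Int)) from rfl, Int.natCast_inj.ne]
        have := Nat.and_one_is_mod k
        constructor
        · intro h; omega
        · intro h; omega
      by_cases hodd : k &&& 1 = 1
      · rw [if_pos (hcond.mpr hodd), if_pos hodd, composeI_cast, composeI_cast]
        exact ih _ hhalf _ hshift _ _
      · rw [if_neg (fun hc => hodd (hcond.mp hc)), if_neg hodd, composeI_cast]
        exact ih _ hhalf _ hshift _ _

-- ---- A's loop as an iterate of pvStep ----
theorem body_eq : (fun (n : Int) (_i : Int) =>
    let m := n <<< (6:Nat)
    let n := prune (mix n m)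
    let m := n >>> (5:Nat)
    let n := prune (mix n m)
    let m := n <<< (11:Nat)
    prune (mix n m)) = fun n _ => pvStep n := by
  funext n i
  simp only [mix, prune, pvStep, show ((2:Int) <<< (23:Nat)) - 1 = 16777215 from by decide]

theorem A_iter : ∀ (k : Nat) (a b : Int), (b - a).toNat = k → ∀ (x : Int),
    (PySem.List.pyRange a b).foldl (fun n _ => pvStep n) x = pvStep^[k] x := by
  intro k
  induction k with
  | zero =>
    intro a b hab x
    rw [PySem.List.pyRange_one_eq_nil (by omega)]
    rfl
  | succ k ih =>
    intro a b hab x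
    rw [PySem.List.pyRange_one_cons (by omega), List.foldl_cons,
      ih (a + 1) b (by omega), Function.iterate_succ_apply]

theorem iter_cast : ∀ (k : Nat) (w : Nat), pvStep^[k] ((w : Nat) : Int) = ((SN^[k] w : Nat) : Int) := by
  intro k
  induction k with
  | zero => intro w; rfl
  | succ k ih =>
    intro w
    rw [Function.iterate_succ_apply, Function.iterate_succ_apply, step_cast, ih]

-- ---- the concrete matrices ----
theorem InvM_MN : InvM MN := by
  constructor
  · simp [MN]
  · intro c hc
    simp only [MN, List.mem_map] at hc
    obtain ⟨i, _, rfl⟩ := hc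
    exact SN_lt _

theorem InvM_IN : InvM IN := by
  constructor
  · simp [IN]
  · intro c hc
    simp only [IN, List.mem_map, List.mem_range] at hc
    obtain ⟨i, hi, rfl⟩ := hc
    exact Nat.pow_lt_pow_right (by norm_num) hi

theorem MN_getD (i : Nat) (h : i < 24) : MN.getD i 0 = SN (2 ^ i) := by
  rw [MN, List.getD_eq_getElem _ _ (by simp; omega), List.getElem_map, List.getElem_range]

theorem IN_getD (i : Nat) (h : i < 24) : IN.getD i 0 = 2 ^ i := by
  rw [IN, List.getD_eq_getElem _ _ (by simp; omega), List.getElem_map, List.getElem_range]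

theorem applyN_IN (w : Nat) (hw : w < 2 ^ 24) : applyN IN w = w := by
  have := applyN_eq_of_basis (fun x => x) rfl (fun _ _ => rfl) IN (fun i hi => IN_getD i hi) w hw
  simpa using this

theorem applyN_MN (w : Nat) (hw : w < 2 ^ 24) : applyN MN w = SN w := by
  exact applyN_eq_of_basis SN SN_zero SN_linear MN (fun i hi => MN_getD i hi) w hw

theorem applyMN_iter : ∀ (k w : Nat), w < 2 ^ 24 → (applyN MN)^[k] w = SN^[k] w := by
  intro k
  induction k with
  | zero => intro w _; rfl
  | succ k ih =>
    intro w hw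
    rw [Function.iterate_succ_apply, Function.iterate_succ_apply, applyN_MN w hw,
      ih (SN w) (SN_lt w)]

theorem m_list_cast : (PySem.List.pyRange 0 24).map (fun i => pvStep ((1:Int) <<< i.toNat)) = castL MN := by
  decide

theorem p_list_cast : (PySem.List.pyRange 0 24).map (fun i => (1:Int) <<< i.toNat) = castL IN := by
  decide

-- ===== VERDICT (by name: the statement is the Claim_ definition above) =====
theorem calculate_secret_number_spec : Claim_equal_calculate_secret_number := by
  intro n times _
  unfold Spec_calculate_secret_number calculate_secret_number calculate_secret_number_alt
  by_cases hts : times ≤ 0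
  · rw [if_pos hts, PySem.List.pyRange_one_eq_nil hts]
    rfl
  · rw [if_neg hts, body_eq]
    obtain ⟨k, hk⟩ : ∃ k, times.toNat = k + 1 := ⟨times.toNat - 1, by omega⟩
    rw [A_iter times.toNat 0 times (by omega) n]
    obtain ⟨w, hw, hsw⟩ := step_int_bound n
    simp only []
    rw [m_list_cast, p_list_cast, pow_cast k (times - 1) (by omega) MN IN, hsw,
      applyI_cast, powN_spec k MN IN InvM_MN InvM_IN w hw, applyN_IN w hw,
      applyMN_iter k w hw, hk, Function.iterate_succ_apply, hsw, iter_cast]
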